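-- pv_equiv track=rewrite | github.com/PaulHobbs/submit-queue-simulation | analyze_sensitivity.py | categorize_parameters
-- ===== SOURCE A (Python) =====
-- from typing import Dict, List, Tuple
--
-- def categorize_parameters(param_names: List[str]) -> Dict[str, List[str]]:
--     """Categorize parameters into Level 1 and Level 2."""
--     level1 = ['resources', 'maxbatch', 'maxk', 'kdiv', 'flaketol']
--     level2 = ['verify_latency', 'fix_delay', 'verify_resource_mult',
--               'bp_threshold_1', 'bp_threshold_2', 'bp_threshold_3']
--
--     categories = {
--         'Level 1 (Explicit)': [p for p in param_names if p in level1],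
--         'Level 2 (Implicit)': [p for p in param_names if p in level2],
--     }
--
--     return categories
-- ===== SOURCE B (Python) =====
-- def categorize_parameters(param_names):
--     """Categorize parameters into Level 1 and Level 2."""
--     label = {
--         'resources': 'Level 1 (Explicit)', 'maxbatch': 'Level 1 (Explicit)',
--         'maxk': 'Level 1 (Explicit)', 'kdiv': 'Level 1 (Explicit)',
--         'flaketol': 'Level 1 (Explicit)',
--         'verify_latency': 'Level 2 (Implicit)', 'fix_delay': 'Level 2 (Implicit)',
--         'verify_resource_mult': 'Level 2 (Implicit)',
--         'bp_threshold_1': 'Level 2 (Implicit)', 'bp_threshold_2': 'Level 2 (Implicit)',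
--         'bp_threshold_3': 'Level 2 (Implicit)',
--     }
--     categories = {'Level 1 (Explicit)': [], 'Level 2 (Implicit)': []}
--     for p in param_names:
--         cat = label.get(p)
--         if cat is not None:
--             categories[cat].append(p)
--     return categories
-- ===== Notes on version B (the rewrite author's own statement) =====
-- stated objective: faster
-- what changed: Replaces A's two separate filtering passes over param_names (one comprehension per category) with a single pass that looks each name up in a precomputed name-to-category dict and appends it to the matching list of a pre-initialized result dict.
import Mathlib
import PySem

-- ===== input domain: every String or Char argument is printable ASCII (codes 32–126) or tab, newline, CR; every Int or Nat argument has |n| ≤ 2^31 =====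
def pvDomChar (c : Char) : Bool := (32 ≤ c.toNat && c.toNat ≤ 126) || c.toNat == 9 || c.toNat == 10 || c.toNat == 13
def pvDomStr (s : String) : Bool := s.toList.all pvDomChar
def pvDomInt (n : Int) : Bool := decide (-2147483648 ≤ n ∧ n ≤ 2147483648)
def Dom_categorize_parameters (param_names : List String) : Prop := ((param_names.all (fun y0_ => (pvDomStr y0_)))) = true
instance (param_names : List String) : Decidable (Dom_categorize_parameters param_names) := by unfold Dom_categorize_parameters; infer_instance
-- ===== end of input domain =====

-- B replaces A's two category-filter passes with one pass over param_names using a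
-- precomputed name→category map and a pre-initialized result dict (alternative decomposition).


-- ===== PORT A =====
def categorize_parameters (param_names : List String) : List (String × List String) :=
  let level1 := ["resources", "maxbatch", "maxk", "kdiv", "flaketol"]
  let level2 := ["verify_latency", "fix_delay", "verify_resource_mult",
                 "bp_threshold_1", "bp_threshold_2", "bp_threshold_3"]
  [("Level 1 (Explicit)", param_names.filter (fun p => level1.contains p)),
   ("Level 2 (Implicit)", param_names.filter (fun p => level2.contains p))]

-- ===== PORT B =====
-- the name→category map of Source B
def pvLabelMap : PySem.Dict String String :=
  PySem.Dict.mk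
    [("resources", "Level 1 (Explicit)"), ("maxbatch", "Level 1 (Explicit)"),
     ("maxk", "Level 1 (Explicit)"), ("kdiv", "Level 1 (Explicit)"),
     ("flaketol", "Level 1 (Explicit)"),
     ("verify_latency", "Level 2 (Implicit)"), ("fix_delay", "Level 2 (Implicit)"),
     ("verify_resource_mult", "Level 2 (Implicit)"),
     ("bp_threshold_1", "Level 2 (Implicit)"), ("bp_threshold_2", "Level 2 (Implicit)"),
     ("bp_threshold_3", "Level 2 (Implicit)")]

-- loop body of Source B: look p up, append it to its category's list (no-op if absent)
def pvStep (d : PySem.Dict String (List String)) (p : String) : PySem.Dict String (List String) :=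
  match pvLabelMap.get? p with
  | some cat => d.modify cat [] (fun l => l ++ [p])
  | none => d

def categorize_parameters_alt (param_names : List String) : List (String × List String) :=
  (param_names.foldl pvStep
    (PySem.Dict.mk [("Level 1 (Explicit)", []), ("Level 2 (Implicit)", [])])).items

-- ===== PRECONDITION & SPEC =====
def Spec_categorize_parameters (param_names : List String) (out : List (String × List String)) : Prop := out = categorize_parameters_alt param_names
instance (param_names : List String) (out : List (String × List String)) : Decidable (Spec_categorize_parameters param_names out) := by unfold Spec_categorize_parameters; infer_instance

-- ===== CLAIM (what is proved, stated in full; the proofs are below) =====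
def Claim_equal_categorize_parameters : Prop := ∀ (param_names : List String), Dom_categorize_parameters param_names → Spec_categorize_parameters param_names (categorize_parameters param_names)

-- ===== LEMMAS AND PROOFS =====

lemma pvStep_l1 (a b : List String) (x : String)
    (h : x ∈ (["resources", "maxbatch", "maxk", "kdiv", "flaketol"] : List String)) :
    pvStep (PySem.Dict.mk [("Level 1 (Explicit)", a), ("Level 2 (Implicit)", b)]) x =
    PySem.Dict.mk [("Level 1 (Explicit)", a ++ [x]), ("Level 2 (Implicit)", b)] := by
  fin_cases h <;>
    simp [pvStep, pvLabelMap, PySem.Dict.get?, PySem.Dict.modify, PySem.Dict.contains,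
          PySem.Dict.insert, PySem.Dict.getD]

lemma pvStep_l2 (a b : List String) (x : String)
    (h : x ∈ (["verify_latency", "fix_delay", "verify_resource_mult",
               "bp_threshold_1", "bp_threshold_2", "bp_threshold_3"] : List String)) :
    pvStep (PySem.Dict.mk [("Level 1 (Explicit)", a), ("Level 2 (Implicit)", b)]) x =
    PySem.Dict.mk [("Level 1 (Explicit)", a), ("Level 2 (Implicit)", b ++ [x])] := by
  fin_cases h <;>
    simp [pvStep, pvLabelMap, PySem.Dict.get?, PySem.Dict.modify, PySem.Dict.contains,
          PySem.Dict.insert, PySem.Dict.getD]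

lemma pvStep_none (d : PySem.Dict String (List String)) (x : String)
    (h1 : x ∉ (["resources", "maxbatch", "maxk", "kdiv", "flaketol"] : List String))
    (h2 : x ∉ (["verify_latency", "fix_delay", "verify_resource_mult",
                "bp_threshold_1", "bp_threshold_2", "bp_threshold_3"] : List String)) :
    pvStep d x = d := by
  simp only [List.mem_cons, not_or] at h1 h2
  obtain ⟨n1, n2, n3, n4, n5, -⟩ := h1
  obtain ⟨m1, m2, m3, m4, m5, m6, -⟩ := h2
  simp [pvStep, pvLabelMap, PySem.Dict.get?,
        Ne.symm n1, Ne.symm n2, Ne.symm n3, Ne.symm n4, Ne.symm n5,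
        Ne.symm m1, Ne.symm m2, Ne.symm m3, Ne.symm m4, Ne.symm m5, Ne.symm m6]

lemma pv_loop_inv (xs : List String) (a b : List String) :
    xs.foldl pvStep (PySem.Dict.mk [("Level 1 (Explicit)", a), ("Level 2 (Implicit)", b)]) =
    PySem.Dict.mk
      [("Level 1 (Explicit)", a ++ xs.filter (fun p => ["resources", "maxbatch", "maxk", "kdiv", "flaketol"].contains p)),
       ("Level 2 (Implicit)", b ++ xs.filter (fun p => ["verify_latency", "fix_delay", "verify_resource_mult", "bp_threshold_1", "bp_threshold_2", "bp_threshold_3"].contains p))] := by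
  induction xs generalizing a b with
  | nil => simp
  | cons x xs ih =>
    by_cases h1 : x ∈ (["resources", "maxbatch", "maxk", "kdiv", "flaketol"] : List String)
    · rw [List.foldl_cons, pvStep_l1 a b x h1, ih]
      have hx1 : (["resources", "maxbatch", "maxk", "kdiv", "flaketol"] : List String).contains x = true := by
        simpa using h1
      have hx2 : (["verify_latency", "fix_delay", "verify_resource_mult", "bp_threshold_1", "bp_threshold_2", "bp_threshold_3"] : List String).contains x = false := by
        fin_cases h1 <;> decide
      simp only [List.filter_cons, hx1, hx2]
      simp
    · by_cases h2 : x ∈ (["verify_latency", "fix_delay", "verify_resource_mult",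
                          "bp_threshold_1", "bp_threshold_2", "bp_threshold_3"] : List String)
      · rw [List.foldl_cons, pvStep_l2 a b x h2, ih]
        have hx1 : (["resources", "maxbatch", "maxk", "kdiv", "flaketol"] : List String).contains x = false := by
          simpa using h1
        have hx2 : (["verify_latency", "fix_delay", "verify_resource_mult", "bp_threshold_1", "bp_threshold_2", "bp_threshold_3"] : List String).contains x = true := by
          simpa using h2
        simp only [List.filter_cons, hx1, hx2]
        simp
      · rw [List.foldl_cons, pvStep_none _ x h1 h2, ih]
        have hx1 : (["resources", "maxbatch", "maxk", "kdiv", "flaketol"] : List String).contains x = false := by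
          simpa using h1
        have hx2 : (["verify_latency", "fix_delay", "verify_resource_mult", "bp_threshold_1", "bp_threshold_2", "bp_threshold_3"] : List String).contains x = false := by
          simpa using h2
        simp only [List.filter_cons, hx1, hx2]
        simp

-- ===== VERDICT (by name: the statement is the Claim_ definition above) =====
theorem categorize_parameters_spec : Claim_equal_categorize_parameters := by
  intro param_names _
  unfold Spec_categorize_parameters categorize_parameters categorize_parameters_alt
  rw [pv_loop_inv]
  simp
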